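-- pv_equiv track=rewrite | github.com/s-yukisato/practice | 218/c.py | upper_left_corner
-- ===== SOURCE A (Python) =====
-- def upper_left_corner(targetList, n):
--     min_x = n
--     min_y = n
--     for y in range(n):
--         for x in range(n):
--             if targetList[y][x] == "#":
--                 min_x = min(min_x, x)
--                 min_y = min(min_y, y)
--     return (min_x, min_y)
-- ===== SOURCE B (Python) =====
-- def upper_left_corner(targetList, n):
--     # topmost marked row: first y whose first-n cells contain '#'
--     min_y = n
--     for y in range(n):
--         if "#" in targetList[y][:n]:
--             min_y = y
--             break
--     # leftmost marked column: min over rows of the leftmost '#' within the first n cells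
--     min_x = n
--     for y in range(n):
--         row = targetList[y][:n]
--         if "#" in row:
--             min_x = min(min_x, row.index("#"))
--     return (min_x, min_y)
-- ===== Notes on version B (the rewrite author's own statement) =====
-- stated objective: alternative
-- what changed: Replaces A's single nested cell-by-cell scan that threads a (min_x, min_y) pair through every cell by two independent per-row passes: min_y is found by an early-exit scan for the topmost row containing '#', and min_x by taking, per row, the leftmost '#' position (membership test + index) and minimising over rows.
import Mathlib
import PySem

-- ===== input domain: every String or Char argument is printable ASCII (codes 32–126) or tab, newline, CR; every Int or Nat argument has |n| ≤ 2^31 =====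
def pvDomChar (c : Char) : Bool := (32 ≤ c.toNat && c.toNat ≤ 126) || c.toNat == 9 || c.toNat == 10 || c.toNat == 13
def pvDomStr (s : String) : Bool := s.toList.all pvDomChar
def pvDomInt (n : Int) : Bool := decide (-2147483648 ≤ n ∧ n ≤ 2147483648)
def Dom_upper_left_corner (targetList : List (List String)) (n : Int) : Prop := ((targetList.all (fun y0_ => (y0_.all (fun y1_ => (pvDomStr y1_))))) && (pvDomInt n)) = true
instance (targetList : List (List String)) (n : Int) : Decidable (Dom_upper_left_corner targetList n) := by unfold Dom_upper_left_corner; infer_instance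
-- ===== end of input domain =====

-- B replaces A's nested cell-by-cell min-tracking with two independent per-row passes
-- (topmost marked row; min over rows of the leftmost '#' in the row's first n cells) — objective: alternative decomposition.

-- ===== PORT A =====
def upper_left_corner (targetList : List (List String)) (n : Int) : Int × Int :=
  (PySem.List.pyRange 0 n 1).foldl
    (fun st y =>
      (PySem.List.pyRange 0 n 1).foldl
        (fun st2 x =>
          if PySem.List.pyGetD (PySem.List.pyGetD targetList y []) x "" = "#" then
            (min st2.1 x, min st2.2 y)
          else st2)
        st)
    (n, n)

-- ===== PORT B =====
-- the first loop of Source B: scan rows in order, stop (break) at the first row whose first n cells contain '#'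
def ulcMinY (targetList : List (List String)) (n : Int) : List Int → Int
  | [] => n
  | y :: ys =>
      if "#" ∈ PySem.List.slice (PySem.List.pyGetD targetList y []) none (some n) then y
      else ulcMinY targetList n ys

def upper_left_corner_alt (targetList : List (List String)) (n : Int) : Int × Int :=
  let minY := ulcMinY targetList n (PySem.List.pyRange 0 n 1)
  let minX := (PySem.List.pyRange 0 n 1).foldl
    (fun a y =>
      let row := PySem.List.slice (PySem.List.pyGetD targetList y []) none (some n)
      match PySem.List.index? row "#" with
      | some i => min a (i : Int)
      | none => a)
    n
  (minX, minY)

-- ===== PRECONDITION & SPEC =====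
-- Pre_ excludes exactly the inputs where Python A raises IndexError: some y < n with
-- n > len(targetList) or some accessed row shorter than n.
def Pre_upper_left_corner (targetList : List (List String)) (n : Int) : Prop :=
  n ≤ (targetList.length : Int) ∧ ∀ row ∈ targetList.take n.toNat, n ≤ (row.length : Int)
instance (targetList : List (List String)) (n : Int) : Decidable (Pre_upper_left_corner targetList n) := by
  unfold Pre_upper_left_corner; infer_instance

def pvWitness_upper_left_corner : List (List String) × Int := ([[".", "#"], ["#", "."]], 2)


def Spec_upper_left_corner (targetList : List (List String)) (n : Int) (out : Int × Int) : Prop := out = upper_left_corner_alt targetList n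
instance (targetList : List (List String)) (n : Int) (out : Int × Int) : Decidable (Spec_upper_left_corner targetList n out) := by unfold Spec_upper_left_corner; infer_instance

-- ===== CLAIM (what is proved, stated in full; the proofs are below) =====
def Claim_equal_upper_left_corner : Prop := ∀ (targetList : List (List String)) (n : Int), Dom_upper_left_corner targetList n → Pre_upper_left_corner targetList n → Spec_upper_left_corner targetList n (upper_left_corner targetList n)


-- ===== LEMMAS AND PROOFS =====

-- A's inner loop over x: the pair state splits into an x-min fold and a 'was any cell marked' flag.
theorem ulc_inner_split (row : List String) (y : Int) (xs : List Int) (st : Int × Int) :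
    xs.foldl
      (fun st2 x =>
        if PySem.List.pyGetD row x "" = "#" then (min st2.1 x, min st2.2 y) else st2) st
    = (xs.foldl (fun a x => if PySem.List.pyGetD row x "" = "#" then min a x else a) st.1,
       if xs.any (fun x => PySem.List.pyGetD row x "" == "#") then min st.2 y else st.2) := by
  induction xs generalizing st with
  | nil => simp
  | cons x xs ih =>
    simp only [List.foldl_cons, List.any_cons]
    by_cases h : PySem.List.pyGetD row x "" = "#"
    · simp only [h, ih, beq_self_eq_true, Bool.true_or, if_true]
      have hmin : min (min st.2 y) y = min st.2 y := by
        rw [min_assoc, min_self]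
      by_cases h2 : xs.any (fun x => PySem.List.pyGetD row x "" == "#")
      · simp [h2, hmin]
      · simp [h2]
    · have hb : (PySem.List.pyGetD row x "" == "#") = false := by
        simp [h]
      simp [h, hb, ih]

-- fold of an if-min over a list everywhere above the accumulator leaves the accumulator unchanged
theorem ulc_foldl_minif_const (p : Int → Bool) (ys : List Int) (b : Int)
    (h : ∀ y ∈ ys, b ≤ y) :
    ys.foldl (fun c y => if p y then min c y else c) b = b := by
  induction ys with
  | nil => rfl
  | cons y ys ih =>
    have hb : min b y = b := min_eq_left (h y (by simp))
    simp only [List.foldl_cons]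
    by_cases hp : p y
    · simp only [hp, if_true, hb]
      exact ih (fun z hz => h z (by simp [hz]))
    · rw [if_neg hp]
      exact ih (fun z hz => h z (by simp [hz]))

-- on a strictly increasing list bounded by the start value, the if-min fold returns the FIRST hit
theorem ulc_foldl_minif_find (p : Int → Bool) :
    ∀ (ys : List Int) (b : Int), ys.Pairwise (· < ·) → (∀ y ∈ ys, y ≤ b) →
      ys.foldl (fun c y => if p y then min c y else c) b = (ys.find? p).getD b := by
  intro ys
  induction ys with
  | nil => intro b _ _; rfl
  | cons y ys ih =>
    intro b hpw hbd
    have hpw' := (List.pairwise_cons.mp hpw).2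
    have hlt := (List.pairwise_cons.mp hpw).1
    by_cases hp : p y
    · rw [List.foldl_cons, if_pos hp]
      have h1 : min b y = y := min_eq_right (hbd y (by simp))
      rw [h1, ulc_foldl_minif_const p ys y (fun z hz => le_of_lt (hlt z hz))]
      simp [hp]
    · rw [List.foldl_cons, if_neg hp, ih b hpw' (fun z hz => hbd z (by simp [hz]))]
      simp [hp]

-- Source B's first loop is find?-of-the-row-predicate with default n
theorem ulcMinY_eq_find (t : List (List String)) (n : Int) (ys : List Int) :
    ulcMinY t n ys
      = (ys.find? (fun y =>
          decide ("#" ∈ PySem.List.slice (PySem.List.pyGetD t y []) none (some n)))).getD n := by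
  induction ys with
  | nil => rfl
  | cons y ys ih =>
    simp only [ulcMinY, List.find?_cons]
    by_cases h : "#" ∈ PySem.List.slice (PySem.List.pyGetD t y []) none (some n) <;>
      simp [h, ih]

-- per-row, Nat form: scanning cells k < m for '#' is membership in the first-m prefix
theorem ulc_any_take (row : List String) : ∀ (m : Nat),
    (List.range m).any (fun k => row.getD k "" == "#") = decide ("#" ∈ row.take m) := by
  intro m
  induction m with
  | zero => simp
  | succ m ih =>
    rw [List.range_succ, List.any_append]
    by_cases hlen : m < row.length
    · have htake : row.take (m + 1) = row.take m ++ [row[m]] := by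
        rw [List.take_add_one]; simp [List.getElem?_eq_getElem hlen]
      have hgd : row.getD m "" = row[m] := List.getD_eq_getElem row "" hlen
      rw [htake, ih]
      by_cases hm : row[m] = "#"
      · simp only [List.mem_append, List.mem_singleton]
        simp [List.getD, List.getElem?_eq_getElem hlen, hm]
      · have hne : ¬ ("#" = row[m]) := fun h => hm h.symm
        have h2 : ("#" ∈ List.take (m + 1) row) ↔ ("#" ∈ List.take m row) := by
          constructor
          · intro h
            rw [htake] at h
            rcases List.mem_append.mp h with h | h
            · exact h
            · exact absurd (List.mem_singleton.mp h) hne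
          · intro h
            rw [htake]
            exact List.mem_append.mpr (Or.inl h)
        simp [List.getD, List.getElem?_eq_getElem hlen, beq_eq_false_iff_ne.mpr hm, h2]
    · have h1 : row.take (m + 1) = row.take m := by
        rw [List.take_of_length_le (by omega), List.take_of_length_le (by omega)]
      rw [h1, ih]
      simp [List.getD, List.getElem?_eq_none (show row.length ≤ m by omega)]

-- per-row, Nat form: the if-min fold over cells k < m is min with the leftmost '#' of the first-m prefix
theorem ulc_rowX_nat (row : List String) : ∀ (m : Nat) (a : Int),
    (List.range m).foldl (fun a k => if row.getD k "" = "#" then min a (k : Int) else a) a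
      = (match PySem.List.index? (row.take m) "#" with
          | some i => min a (i : Int)
          | none => a) := by
  intro m
  induction m with
  | zero => intro a; simp [PySem.List.index?]
  | succ m ih =>
    intro a
    rw [List.range_succ, List.foldl_append, ih a]
    by_cases hlen : m < row.length
    · have htake : row.take (m + 1) = row.take m ++ [row[m]] := by
        rw [List.take_add_one]; simp [List.getElem?_eq_getElem hlen]
      have hgd : row.getD m "" = row[m] := List.getD_eq_getElem row "" hlen
      by_cases hmem : "#" ∈ row.take m
      · obtain ⟨i, hi⟩ := Option.isSome_iff_exists.mp ((PySem.List.index?_isSome_iff _ _).mpr hmem)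
        have hilt : (i : Int) ≤ (m : Int) := by
          obtain ⟨hk, _, _⟩ := PySem.List.getElem_of_index?_eq_some hi
          have : i < m + 1 := lt_of_lt_of_le hk (by simp)
          omega
        rw [htake, PySem.List.index?_append_of_mem _ hmem, hi]
        simp only [List.foldl_cons, List.foldl_nil, hgd]
        by_cases hm : row[m] = "#"
        · rw [if_pos hm, min_assoc, min_eq_left hilt]
        · rw [if_neg hm]
      · have hnone : PySem.List.index? (row.take m) "#" = none :=
          (PySem.List.index?_eq_none_iff _ _).mpr hmem
        rw [hnone]
        simp only [List.foldl_cons, List.foldl_nil, hgd]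
        by_cases hm : row[m] = "#"
        · have : PySem.List.index? (row.take m ++ [row[m]]) "#" = some (row.take m).length := by
            rw [hm]; exact PySem.List.index?_append_singleton_self _ _ hmem
          rw [if_pos hm, htake, this]
          have hl : (row.take m).length = m := by
            simp [List.length_take]; omega
          rw [hl]
        · have hmem' : "#" ∉ row.take m ++ [row[m]] := by
            intro h
            rcases List.mem_append.mp h with h | h
            · exact hmem h
            · exact hm ((List.mem_singleton.mp h).symm)
          rw [if_neg hm, htake, (PySem.List.index?_eq_none_iff _ _).mpr hmem']
    · have h1 : row.take (m + 1) = row.take m := by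
        rw [List.take_of_length_le (by omega), List.take_of_length_le (by omega)]
      have hgd : row.getD m "" = "" := List.getD_eq_default row "" (by omega)
      rw [h1]
      simp only [List.foldl_cons, List.foldl_nil, hgd]
      rw [if_neg (by decide)]

-- Int lift of ulc_rowX_nat onto pyRange / slice
theorem ulc_rowX_int (row : List String) (n : Int) (hn : 0 ≤ n) (a : Int) :
    (PySem.List.pyRange 0 n 1).foldl
      (fun a x => if PySem.List.pyGetD row x "" = "#" then min a x else a) a
    = (match PySem.List.index? (PySem.List.slice row none (some n)) "#" with
        | some i => min a (i : Int)
        | none => a) := by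
  rw [PySem.List.slice_to row hn, PySem.List.pyRange_one]
  rw [List.foldl_map]
  simp only [zero_add, PySem.List.pyGetD_natCast, sub_zero]
  exact ulc_rowX_nat row n.toNat a

-- Int lift of ulc_any_take
theorem ulc_any_int (row : List String) (n : Int) (hn : 0 ≤ n) :
    (PySem.List.pyRange 0 n 1).any (fun x => PySem.List.pyGetD row x "" == "#")
      = decide ("#" ∈ PySem.List.slice row none (some n)) := by
  rw [PySem.List.slice_to row hn, PySem.List.pyRange_one]
  rw [List.any_map]
  simp only [Function.comp_def, zero_add, PySem.List.pyGetD_natCast, sub_zero]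
  exact ulc_any_take row n.toNat

-- ===== VERDICT (by name: the statement is the Claim_ definition above) =====
theorem upper_left_corner_spec : Claim_equal_upper_left_corner := by
  intro t n _ _
  show upper_left_corner t n = upper_left_corner_alt t n
  by_cases hn : 0 ≤ n
  · unfold upper_left_corner upper_left_corner_alt
    have hsplit : (fun (st : Int × Int) (y : Int) =>
        (PySem.List.pyRange 0 n 1).foldl
          (fun st2 x =>
            if PySem.List.pyGetD (PySem.List.pyGetD t y []) x "" = "#" then
              (min st2.1 x, min st2.2 y)
            else st2) st)
      = (fun (st : Int × Int) (y : Int) =>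
          ((PySem.List.pyRange 0 n 1).foldl
             (fun a x => if PySem.List.pyGetD (PySem.List.pyGetD t y []) x "" = "#" then min a x else a) st.1,
           if (PySem.List.pyRange 0 n 1).any
                (fun x => PySem.List.pyGetD (PySem.List.pyGetD t y []) x "" == "#") then min st.2 y
           else st.2)) := by
      funext st y
      exact ulc_inner_split (PySem.List.pyGetD t y []) y (PySem.List.pyRange 0 n 1) st
    rw [hsplit]
    rw [PySem.List.foldl_prod_mk
      (f := fun (a : Int) (y : Int) =>
        (PySem.List.pyRange 0 n 1).foldl
          (fun a x => if PySem.List.pyGetD (PySem.List.pyGetD t y []) x "" = "#" then min a x else a) a)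
      (g := fun (b : Int) (y : Int) =>
        if (PySem.List.pyRange 0 n 1).any
            (fun x => PySem.List.pyGetD (PySem.List.pyGetD t y []) x "" == "#") then min b y
        else b)]
    refine Prod.ext ?_ ?_
    · -- the min_x components agree row by row
      show _ = (PySem.List.pyRange 0 n 1).foldl _ n
      refine congrArg (fun f => List.foldl f n (PySem.List.pyRange 0 n 1)) ?_
      funext a y
      exact ulc_rowX_int (PySem.List.pyGetD t y []) n hn a
    · -- the min_y components agree: first-hit fold = break loop
      show _ = ulcMinY t n (PySem.List.pyRange 0 n 1)
      have hpred : (fun (b : Int) (y : Int) =>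
          if (PySem.List.pyRange 0 n 1).any
              (fun x => PySem.List.pyGetD (PySem.List.pyGetD t y []) x "" == "#") then min b y
          else b)
        = (fun (b : Int) (y : Int) =>
            if decide ("#" ∈ PySem.List.slice (PySem.List.pyGetD t y []) none (some n)) then min b y
            else b) := by
        funext b y
        rw [ulc_any_int (PySem.List.pyGetD t y []) n hn]
      rw [hpred]
      rw [ulc_foldl_minif_find _ (PySem.List.pyRange 0 n 1) n
        (PySem.List.pairwise_lt_pyRange_one 0 n)
        (fun y hy => le_of_lt ((PySem.List.mem_pyRange_one.mp hy).2)),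
        ulcMinY_eq_find]
  · have hnil : PySem.List.pyRange 0 n 1 = [] :=
      PySem.List.pyRange_one_eq_nil (by omega)
    simp [upper_left_corner, upper_left_corner_alt, ulcMinY, hnil]
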